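-- pv_equiv track=rewrite | github.com/pypi-data/pypi-mirror-402 | packages/tson/tson-1.1.0-py3-none-any.whl/tson/utils.py | find_trailing_hash
-- ===== SOURCE A (Python) =====
-- def find_trailing_hash(schema_str: str) -> int:
--     """
--     Find the position of a trailing #N in a schema string.
--
--     Only finds # that is NOT inside quotes or nested parentheses.
--
--     Args:
--         schema_str: Schema string to search
--
--     Returns:
--         Index of the # character, or -1 if not found
--     """
--     in_quotes = False
--     depth_paren = 0
--
--     # Scan backwards to find the last # that is outside quotes and parens
--     for i in range(len(schema_str) - 1, -1, -1):
--         char = schema_str[i]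
--
--         if char == '"':
--             # Check for escaped quote
--             backslash_count = 0
--             for j in range(i - 1, -1, -1):
--                 if schema_str[j] == '\\':
--                     backslash_count += 1
--                 else:
--                     break
--             if backslash_count % 2 == 0:
--                 in_quotes = not in_quotes
--
--         if not in_quotes:
--             if char == ')':
--                 depth_paren += 1
--             elif char == '(':
--                 depth_paren -= 1
--             elif char == '#' and depth_paren == 0:
--                 return i
--
--     return -1
-- ===== SOURCE B (Python) =====
-- def find_trailing_hash(schema_str: str) -> int:
--     """Find the last top-level unquoted '#': one forward pass precomputes
--     escape parities, then one backward scan needs no inner backslash re-scan."""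
--     n = len(schema_str)
--     # esc[i] is True iff the backslash run immediately before index i has odd length
--     esc = [False] * n
--     run = 0
--     for i, c in enumerate(schema_str):
--         esc[i] = (run % 2 == 1)
--         run = run + 1 if c == '\\' else 0
--
--     in_quotes = False
--     depth = 0
--     for i in range(n - 1, -1, -1):
--         c = schema_str[i]
--         if c == '"' and not esc[i]:
--             in_quotes = not in_quotes
--         if not in_quotes:
--             if c == ')':
--                 depth += 1
--             elif c == '(':
--                 depth -= 1
--             elif c == '#' and depth == 0:
--                 return i
--     return -1
-- ===== Notes on version B (the rewrite author's own statement) =====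
-- stated objective: alternative
-- what changed: A re-scans the backslash run before every quote it meets (a nested loop); B precomputes each position's escape parity in one forward pass and then does a single backward scan with O(1) escape lookups (it trades A's early exit for a linear worst case).
import Mathlib
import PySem

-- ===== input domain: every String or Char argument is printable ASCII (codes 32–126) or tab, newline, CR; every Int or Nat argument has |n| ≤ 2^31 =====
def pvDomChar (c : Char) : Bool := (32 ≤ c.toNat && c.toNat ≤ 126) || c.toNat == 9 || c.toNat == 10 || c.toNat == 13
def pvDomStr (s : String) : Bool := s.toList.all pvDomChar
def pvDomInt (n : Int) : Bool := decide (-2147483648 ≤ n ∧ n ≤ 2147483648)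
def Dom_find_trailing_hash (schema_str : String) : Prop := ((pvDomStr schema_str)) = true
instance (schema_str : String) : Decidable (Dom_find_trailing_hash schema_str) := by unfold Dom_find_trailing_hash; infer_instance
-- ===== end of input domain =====

-- B replaces A's inner backslash re-scan before each quote by a single forward pass that
-- precomputes every position's escape parity, so the backward scan needs no nested loop.

-- ===== PORT A =====

-- inner loop of A: for j in range(i-1, -1, -1): count backslashes, break at first other char
def pvBackslashCount (l : List Char) : Nat → Nat
  | 0 => 0
  | j + 1 => if l.getD j ' ' == '\\' then pvBackslashCount l j + 1 else 0

-- outer loop of A: argument k = i + 1 (number of remaining iterations, index i = k - 1)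
def pvLoopA (l : List Char) : Nat → Bool → Int → Int
  | 0, _, _ => -1
  | k + 1, in_quotes, depth_paren =>
    let c := l.getD k ' '
    let in_quotes' :=
      if c == '"' && (pvBackslashCount l k) % 2 == 0 then !in_quotes else in_quotes
    if !in_quotes' then
      if c == ')' then pvLoopA l k in_quotes' (depth_paren + 1)
      else if c == '(' then pvLoopA l k in_quotes' (depth_paren - 1)
      else if c == '#' && depth_paren == 0 then (k : Int)
      else pvLoopA l k in_quotes' depth_paren
    else pvLoopA l k in_quotes' depth_paren

def find_trailing_hash (schema_str : String) : Int :=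
  pvLoopA schema_str.toList schema_str.toList.length false 0

-- ===== PORT B =====

-- forward pass of B: esc[i] = (run % 2 == 1), run := run + 1 if backslash else 0
def pvBuildEsc : List Char → Nat → List Bool
  | [], _ => []
  | c :: rest, run =>
      decide (run % 2 = 1) :: pvBuildEsc rest (if c == '\\' then run + 1 else 0)

-- backward pass of B (k = i + 1), escape test is one list lookup
def pvLoopB (l : List Char) (esc : List Bool) : Nat → Bool → Int → Int
  | 0, _, _ => -1
  | k + 1, in_quotes, depth =>
    let c := l.getD k ' '
    let in_quotes' :=
      if c == '"' && !(esc.getD k false) then !in_quotes else in_quotes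
    if !in_quotes' then
      if c == ')' then pvLoopB l esc k in_quotes' (depth + 1)
      else if c == '(' then pvLoopB l esc k in_quotes' (depth - 1)
      else if c == '#' && depth == 0 then (k : Int)
      else pvLoopB l esc k in_quotes' depth
    else pvLoopB l esc k in_quotes' depth

def find_trailing_hash_alt (schema_str : String) : Int :=
  let l := schema_str.toList
  pvLoopB l (pvBuildEsc l 0) l.length false 0

-- ===== PRECONDITION & SPEC =====
def Spec_find_trailing_hash (schema_str : String) (out : Int) : Prop := out = find_trailing_hash_alt schema_str
instance (schema_str : String) (out : Int) : Decidable (Spec_find_trailing_hash schema_str out) := by unfold Spec_find_trailing_hash; infer_instance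

-- ===== CLAIM (what is proved, stated in full; the proofs are below) =====
def Claim_equal_find_trailing_hash : Prop := ∀ (schema_str : String), Dom_find_trailing_hash schema_str → Spec_find_trailing_hash schema_str (find_trailing_hash schema_str)

-- ===== LEMMAS AND PROOFS =====

-- backslash run entering index k when the run entering index 0 is `run`
def pvRunAt (l : List Char) (run : Nat) : Nat → Nat
  | 0 => run
  | k + 1 => if l.getD k ' ' == '\\' then pvRunAt l run k + 1 else 0

theorem pvRunAt_cons (c : Char) (rest : List Char) (run : Nat) :
    ∀ k, pvRunAt (c :: rest) run (k + 1) = pvRunAt rest (if c == '\\' then run + 1 else 0) k := by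
  intro k
  induction k with
  | zero => simp [pvRunAt]
  | succ k ih =>
    have h1 : pvRunAt (c :: rest) run (k + 1 + 1) =
        if (c :: rest).getD (k + 1) ' ' == '\\' then pvRunAt (c :: rest) run (k + 1) + 1 else 0 := rfl
    rw [h1, ih]; rfl

theorem pvRunAt_zero_eq (l : List Char) : ∀ k, pvRunAt l 0 k = pvBackslashCount l k := by
  intro k
  induction k with
  | zero => rfl
  | succ k ih => simp [pvRunAt, pvBackslashCount, ih]

theorem pvBuildEsc_getD (l : List Char) :
    ∀ run k, k < l.length →
      (pvBuildEsc l run).getD k false = decide (pvRunAt l run k % 2 = 1) := by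
  induction l with
  | nil => intro run k h; simp at h
  | cons c rest ih =>
    intro run k h
    cases k with
    | zero => simp [pvBuildEsc, pvRunAt]
    | succ k =>
      simp only [pvBuildEsc, List.getD_cons_succ, pvRunAt_cons]
      exact ih _ k (by simpa using h)

theorem pvLoop_eq (l : List Char) :
    ∀ k, k ≤ l.length → ∀ inq depth,
      pvLoopA l k inq depth = pvLoopB l (pvBuildEsc l 0) k inq depth := by
  intro k
  induction k with
  | zero => intro _ inq depth; rfl
  | succ k ih =>
    intro h inq depth
    have hk : k < l.length := h
    have hesc : (pvBuildEsc l 0).getD k false = decide (pvBackslashCount l k % 2 = 1) := by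
      rw [pvBuildEsc_getD l 0 k hk, pvRunAt_zero_eq]
    have hparity : (pvBackslashCount l k % 2 == 0) = !(pvBuildEsc l 0).getD k false := by
      rw [hesc]
      rcases Nat.mod_two_eq_zero_or_one (pvBackslashCount l k) with h2 | h2 <;> simp [h2]
    simp only [pvLoopA, pvLoopB, hparity]
    have ih' := ih (Nat.le_of_lt hk)
    split_ifs <;> first | rfl | exact ih' _ _

-- ===== VERDICT (by name: the statement is the Claim_ definition above) =====
theorem find_trailing_hash_spec : Claim_equal_find_trailing_hash := by
  intro s _
  show find_trailing_hash s = find_trailing_hash_alt s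
  exact pvLoop_eq s.toList s.toList.length (Nat.le_refl _) false 0
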